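-- pv_equiv track=rewrite | github.com/YanFuGroup/DiNovo | TDMapping/common_function.py | transfer_str_to_list_seq
-- ===== SOURCE A (Python) =====
-- def transfer_str_to_list_seq(seq_str):
--     if "(" not in seq_str:
--         return list(seq_str)
--     else:
--         #如果存在(，则把(前一个字符直到)的内容当做一个元素
--         seq_list = []
--         i = 0
--         while i < len(seq_str):
--             if seq_str[i] == "(":
--                 j = i
--                 while seq_str[j] != ")":
--                     j += 1
--                 seq_list[-1] = seq_str[i-1:j+1]
--                 i = j+1
--             else:
--                 seq_list.append(seq_str[i])
--                 i += 1
--     return seq_list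
-- ===== SOURCE B (Python) =====
-- def transfer_str_to_list_seq(seq_str):
--     result = []
--     in_paren = False
--     for ch in seq_str:
--         if in_paren:
--             result[-1] += ch
--             if ch == ")":
--                 in_paren = False
--         elif ch == "(":
--             result[-1] += ch
--             in_paren = True
--         else:
--             result.append(ch)
--     return result
-- ===== Notes on version B (the rewrite author's own statement) =====
-- stated objective: simpler
-- what changed: Replaces A's two-branch design (separate no-paren path, index-jumping loop with an inner scan-to-')' and a slice rebuild) by a single flat left-to-right pass with an in_paren flag that appends characters either to the last element or as fresh elements.
-- intended difference: On strings where the ')' closing a parenthesized group is immediately followed by '(', A overwrites the previous element with the slice starting at that ')' (e.g. 'C(a)(b)' -> [')(b)']), while B appends the new group to the full previous element (['C(a)(b)']), which is the intended grouping of consecutive modifications. — e.g. on transfer_str_to_list_seq("C(a)(b)"): A returns [")(b)"], B returns ["C(a)(b)"]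
import Mathlib
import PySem

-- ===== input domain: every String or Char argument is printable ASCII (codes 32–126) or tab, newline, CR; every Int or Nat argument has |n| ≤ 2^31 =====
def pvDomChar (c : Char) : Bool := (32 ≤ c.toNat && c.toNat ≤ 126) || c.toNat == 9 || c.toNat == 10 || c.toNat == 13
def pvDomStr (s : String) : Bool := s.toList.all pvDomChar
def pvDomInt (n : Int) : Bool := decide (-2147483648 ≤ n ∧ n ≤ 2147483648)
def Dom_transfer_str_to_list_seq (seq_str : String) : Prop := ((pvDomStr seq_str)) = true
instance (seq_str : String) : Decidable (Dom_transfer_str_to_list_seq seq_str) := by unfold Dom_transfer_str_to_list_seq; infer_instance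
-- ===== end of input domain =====

-- B replaces A's jump-ahead loop with inner scan-to-')' by a single flat pass with an
-- in_paren flag (simpler); on groups immediately following a ')' that closes a group the two
-- differ intentionally (see D_ below). Equality proved on Pre_ (A raises elsewhere) outside D_.

-- ===== PORT A =====
-- inner 'while seq_str[j] != ")": j += 1' — none models Python's IndexError when j runs past the end
def findCloseA (cs : List Char) : Nat → Nat → Option Nat
  | 0, _ => none
  | fuel + 1, j =>
    if h : j < cs.length then
      if cs[j] = ')' then some j else findCloseA cs fuel (j + 1)
    else none

-- outer 'while i < len(seq_str)' as fuel recursion (i strictly increases each iteration)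
def loopA (cs : List Char) : Nat → Nat → List String → List String
  | 0, _, acc => acc
  | fuel + 1, i, acc =>
    if h : i < cs.length then
      if cs[i] = '(' then
        match findCloseA cs (cs.length - i) i with
        | some j =>
            -- seq_list[-1] = seq_str[i-1:j+1]  (on empty seq_list Python raises; outside Pre_)
            loopA cs fuel (j + 1)
              (acc.dropLast ++ [String.ofList (PySem.List.slice cs (some ((i : Int) - 1)) (some ((j : Int) + 1)))])
        | none => acc   -- Python raises IndexError in the inner scan; outside Pre_
      else loopA cs fuel (i + 1) (acc ++ [String.singleton cs[i]])
    else acc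

def transfer_str_to_list_seq (seq_str : String) : List String :=
  let cs := seq_str.toList
  if '(' ∉ cs then cs.map String.singleton
  else loopA cs (cs.length + 1) 0 []

-- ===== PORT B =====
-- result[-1] += ch ; on empty result Python raises IndexError (only reachable outside Pre_)
def appendLastB (acc : List String) (c : Char) : List String :=
  acc.dropLast ++ [acc.getLastD "" ++ String.singleton c]

def loopB : List Char → List String → Bool → List String
  | [], acc, _ => acc
  | c :: rest, acc, true => loopB rest (appendLastB acc c) (if c = ')' then false else true)
  | c :: rest, acc, false =>
    if c = '(' then loopB rest (appendLastB acc c) true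
    else loopB rest (acc ++ [String.singleton c]) false

def transfer_str_to_list_seq_alt (seq_str : String) : List String :=
  loopB seq_str.toList [] false

-- ===== PRECONDITION & SPEC =====
-- Pre_ excludes exactly the inputs where A raises IndexError: a '(' at position 0
-- (seq_list[-1] on the empty list) or a '(' with no ')' after it, i.e. a last paren that
-- is '(' (the inner scan runs off the end).
def Pre_transfer_str_to_list_seq (seq_str : String) : Prop :=
  seq_str.toList.head? ≠ some '(' ∧
  seq_str.toList.reverse.find? (fun c => c == '(' || c == ')') ≠ some '('
instance (seq_str : String) : Decidable (Pre_transfer_str_to_list_seq seq_str) := by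
  unfold Pre_transfer_str_to_list_seq; infer_instance

def pvWitness_transfer_str_to_list_seq : String := "AC(+57.02)DE"

-- On strings where a closing ')' of a parenthesized group is immediately followed by '(',
-- A overwrites the previous element with the slice starting at that ')' (e.g. "C(a)(b)" → [")(b)"]),
-- while B appends the new group to the full previous element (["C(a)(b)"]), the intended grouping
-- of consecutive modifications.
-- dGo b cs: one cheap pass; b = "the paren seen most recently is '('"; true iff some ')'
-- whose nearest earlier paren is '(' is immediately followed by '('
def dGo : Bool → List Char → Bool
  | true, ')' :: '(' :: _ => true
  | b, c :: t => dGo (c == '(' || b && c != ')') t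
  | _, _ => false

def D_transfer_str_to_list_seq (seq_str : String) : Prop :=
  dGo false seq_str.toList
instance (seq_str : String) : Decidable (D_transfer_str_to_list_seq seq_str) := by
  unfold D_transfer_str_to_list_seq; infer_instance

def Spec_transfer_str_to_list_seq (seq_str : String) (out : List String) : Prop :=
  ¬ D_transfer_str_to_list_seq seq_str → out = transfer_str_to_list_seq_alt seq_str
instance (seq_str : String) (out : List String) : Decidable (Spec_transfer_str_to_list_seq seq_str out) := by
  unfold Spec_transfer_str_to_list_seq; infer_instance

def pvDiffWitness_transfer_str_to_list_seq : String := "C(a)(b)"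
def pvDiffWitnessOut_transfer_str_to_list_seq : (List String) × (List String) :=
  ([")(b)"], ["C(a)(b)"])

-- ===== CLAIM =====
def Claim_unchanged_transfer_str_to_list_seq : Prop := ∀ (seq_str : String), Dom_transfer_str_to_list_seq seq_str → Pre_transfer_str_to_list_seq seq_str → Spec_transfer_str_to_list_seq seq_str (transfer_str_to_list_seq seq_str)
def Claim_exact_transfer_str_to_list_seq : Prop := ∀ (seq_str : String), Dom_transfer_str_to_list_seq seq_str → Pre_transfer_str_to_list_seq seq_str → D_transfer_str_to_list_seq seq_str → transfer_str_to_list_seq seq_str ≠ transfer_str_to_list_seq_alt seq_str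
def Claim_changed_transfer_str_to_list_seq : Prop := Dom_transfer_str_to_list_seq (pvDiffWitness_transfer_str_to_list_seq) ∧ Pre_transfer_str_to_list_seq (pvDiffWitness_transfer_str_to_list_seq) ∧ D_transfer_str_to_list_seq (pvDiffWitness_transfer_str_to_list_seq) ∧ transfer_str_to_list_seq (pvDiffWitness_transfer_str_to_list_seq) = pvDiffWitnessOut_transfer_str_to_list_seq.1 ∧ transfer_str_to_list_seq_alt (pvDiffWitness_transfer_str_to_list_seq) = pvDiffWitnessOut_transfer_str_to_list_seq.2 ∧ pvDiffWitnessOut_transfer_str_to_list_seq.1 ≠ pvDiffWitnessOut_transfer_str_to_list_seq.2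

-- ===== LEMMAS AND PROOFS =====

-- no '(' in l: B appends every char as a fresh element
theorem loopB_noParen (l : List Char) (acc : List String) (h : '(' ∉ l) :
    loopB l acc false = acc ++ l.map String.singleton := by
  induction l generalizing acc with
  | nil => simp [loopB]
  | cons c rest ih =>
    have hc : c ≠ '(' := fun hh => h (hh ▸ List.mem_cons_self)
    simp only [loopB, if_neg hc]
    rw [ih _ (fun hm => h (List.mem_cons_of_mem _ hm))]
    simp

-- consuming one parenthesized group in B: flag true until the first ')'
theorem loopB_group (seg : List Char) (rest : List Char) (front : List String) (x : String)
    (h : ')' ∉ seg) :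
    loopB (seg ++ ')' :: rest) (front ++ [x]) true
      = loopB rest (front ++ [x ++ String.ofList (seg ++ [')'])]) false := by
  induction seg generalizing x with
  | nil =>
    simp only [List.nil_append, loopB, appendLastB]
    rw [List.dropLast_concat, List.getLastD_concat]
    have hx : x.push ')' = x ++ String.ofList [')'] := by
      apply String.toList_injective; simp
    simp [hx]
  | cons c seg' ih =>
    have hc : c ≠ ')' := fun hh => h (hh ▸ List.mem_cons_self)
    simp only [List.cons_append, loopB, appendLastB, if_neg hc]
    rw [List.dropLast_concat, List.getLastD_concat]
    rw [ih (x ++ String.singleton c) (fun hm => h (List.mem_cons_of_mem _ hm))]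
    congr 3
    apply String.toList_injective
    simp

theorem findCloseA_spec (cs : List Char) (fuel j k : Nat) (h : findCloseA cs fuel j = some k) :
    j ≤ k ∧ k < cs.length ∧ cs[k]? = some ')' ∧ ∀ r, j ≤ r → r < k → cs[r]? ≠ some ')' := by
  induction fuel generalizing j with
  | zero => simp [findCloseA] at h
  | succ fuel ih =>
    by_cases hj : j < cs.length
    · rw [findCloseA, dif_pos hj] at h
      by_cases hcl : cs[j] = ')'
      · rw [if_pos hcl] at h
        cases h
        refine ⟨le_refl _, hj, by simp [List.getElem?_eq_getElem hj, hcl], ?_⟩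
        intro r h1 h2; omega
      · rw [if_neg hcl] at h
        obtain ⟨h1, h2, h3, h4⟩ := ih (j + 1) h
        refine ⟨by omega, h2, h3, ?_⟩
        intro r hr1 hr2
        rcases Nat.eq_or_lt_of_le hr1 with rfl | hlt
        · simp [List.getElem?_eq_getElem hj]; exact hcl
        · exact h4 r hlt hr2
    · rw [findCloseA, dif_neg hj] at h; simp at h

theorem findCloseA_isSome (cs : List Char) (fuel j j' : Nat) (hfe : cs.length - j ≤ fuel)
    (hj' : j ≤ j') (hl : j' < cs.length) (hcl : cs[j']? = some ')') :
    ∃ k, findCloseA cs fuel j = some k := by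
  induction fuel generalizing j with
  | zero => omega
  | succ fuel ih =>
    have hj : j < cs.length := by omega
    rw [findCloseA, dif_pos hj]
    by_cases hc : cs[j] = ')'
    · exact ⟨j, if_pos hc⟩
    · rw [if_neg hc]
      have hne : j ≠ j' := by
        intro rfl'
        subst rfl'
        rw [List.getElem?_eq_getElem hj] at hcl
        exact hc (by injection hcl)
      exact ih (j + 1) (by omega) (by omega)

-- 'group-close' predicate: position p holds a ')' that closes a parenthesized group
def GCclose (cs : List Char) (p : Nat) : Prop :=
  ∃ q < p, cs[q]? = some '(' ∧ ∀ r < p, q < r → cs[r]? ≠ some ')'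

-- one parenthesized-group step, reduced on both sides (shared by the equality and
-- the divergence inductions); gseg i j = the group's interior after the '('
theorem paren_step (cs : List Char)
    (hPre : ∀ i < cs.length, cs[i]? = some '(' →
      1 ≤ i ∧ ∃ j < cs.length, i < j ∧ cs[j]? = some ')')
    (fuel i : Nat) (hi : i < cs.length) (h1 : 1 ≤ i) (hpar : cs[i] = '(') :
    ∃ j, i < j ∧ j < cs.length ∧ cs[j]? = some ')' ∧
      (∀ r, i ≤ r → r < j → cs[r]? ≠ some ')') ∧
      ((cs.drop (i + 1)).take (j - (i + 1))).length = j - (i + 1) ∧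
      (∀ acc : List String, loopA cs (fuel + 1) i acc
        = loopA cs fuel (j + 1) (acc.dropLast ++
            [String.ofList (cs.getD (i - 1) ' ' :: '(' :: ((cs.drop (i + 1)).take (j - (i + 1)) ++ [')']))])) ∧
      (∀ (f : List String) (x : String), loopB (cs.drop i) (f ++ [x]) false
        = loopB (cs.drop (j + 1)) (f ++ [x ++ String.ofList ('(' :: ((cs.drop (i + 1)).take (j - (i + 1)) ++ [')']))]) false) := by
  have hiq : cs[i]? = some '(' := by rw [List.getElem?_eq_getElem hi, hpar]
  obtain ⟨-, j', hj', hij', hcl'⟩ := hPre i hi hiq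
  obtain ⟨j, hfc⟩ := findCloseA_isSome cs (cs.length - i) i j' (le_refl _)
    (le_of_lt hij') hj' hcl'
  obtain ⟨hij, hjlen, hjq, hnoc⟩ := findCloseA_spec cs (cs.length - i) i j hfc
  have hjcl : cs[j] = ')' := by
    rw [List.getElem?_eq_getElem hjlen] at hjq; injection hjq
  have hij' : i < j := by
    rcases Nat.eq_or_lt_of_le hij with rfl | h
    · rw [hpar] at hjcl; exact absurd hjcl (by decide)
    · exact h
  set seg : List Char := (cs.drop (i + 1)).take (j - (i + 1)) with hseg
  have hseglen : seg.length = j - (i + 1) := by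
    simp [hseg, List.length_take, List.length_drop]; omega
  have hdropj : cs.drop j = ')' :: cs.drop (j + 1) := by
    rw [List.drop_eq_getElem_cons hjlen, hjcl]
  have hdropi1 : cs.drop (i + 1) = seg ++ ')' :: cs.drop (j + 1) := by
    rw [hseg]
    conv_lhs => rw [← List.take_append_drop (j - (i + 1)) (cs.drop (i + 1))]
    rw [List.drop_drop, show i + 1 + (j - (i + 1)) = j by omega, hdropj]
  have hdropi : cs.drop i = '(' :: (seg ++ ')' :: cs.drop (j + 1)) := by
    rw [List.drop_eq_getElem_cons hi, hpar, hdropi1]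
  have hdropi0 : cs.drop (i - 1) = cs[i - 1]'(by omega) :: '(' :: (seg ++ ')' :: cs.drop (j + 1)) := by
    rw [List.drop_eq_getElem_cons (show i - 1 < cs.length by omega),
      Nat.sub_add_cancel h1, hdropi]
  have hnosegcl : ')' ∉ seg := by
    intro hm
    obtain ⟨r, hr, hrv⟩ := List.mem_iff_getElem.mp hm
    have hr' : r < j - (i + 1) := by omega
    have : seg[r] = cs[i + 1 + r]'(by omega) := by
      simp [hseg, List.getElem_take, List.getElem_drop]
    rw [this] at hrv
    exact hnoc (i + 1 + r) (by omega) (by omega)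
      (by rw [List.getElem?_eq_getElem (by omega), hrv])
  have hgetD : cs.getD (i - 1) ' ' = cs[i - 1]'(by omega) := by
    simp [List.getD_eq_getElem?_getD, List.getElem?_eq_getElem (show i - 1 < cs.length by omega)]
  have hslice : PySem.List.slice cs (some ((i : Int) - 1)) (some ((j : Int) + 1))
      = cs[i - 1]'(by omega) :: '(' :: (seg ++ [')']) := by
    have e1 : ((i : Int) - 1) = ((i - 1 : Nat) : Int) := by omega
    have e2 : ((j : Int) + 1) = ((j + 1 : Nat) : Int) := by omega
    rw [e1, e2, PySem.List.slice_natCast, hdropi0]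
    have : j + 1 - (i - 1) = (j - i - 1) + 3 := by omega
    rw [this]
    simp only [List.take_succ_cons]
    congr 1
    congr 1
    rw [List.take_append, hseglen,
      show j - i - 1 + 1 - (j - (i + 1)) = 1 by omega,
      List.take_of_length_le (by omega), List.take_cons, List.take_zero]
    omega
  refine ⟨j, hij', hjlen, hjq, hnoc, hseglen, ?_, ?_⟩
  · intro acc
    rw [loopA, dif_pos hi, if_pos hpar, hfc]
    simp only []
    have : String.ofList (PySem.List.slice cs (some ((i : Int) - 1)) (some ((j : Int) + 1)))
        = String.ofList (cs.getD (i - 1) ' ' :: '(' :: (seg ++ [')'])) := by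
      apply String.toList_injective
      simp [hslice, hgetD, List.getD_eq_getElem?_getD,
        List.getElem?_eq_getElem (show i - 1 < cs.length by omega)]
    rw [this, hseg]
  · intro f x
    rw [hdropi, loopB, if_pos rfl, appendLastB, List.dropLast_concat, List.getLastD_concat,
      loopB_group seg (cs.drop (j + 1)) f (x ++ String.singleton '(') hnosegcl]
    have : x ++ String.singleton '(' ++ String.ofList (seg ++ [')'])
        = x ++ String.ofList ('(' :: (seg ++ [')'])) := by
      apply String.toList_injective
      simp
    rw [this, hseg]

-- once the two accumulators differ (same length; front parts differ, or the last elements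
-- have different, positive lengths), they differ forever
theorem diff_lemma (cs : List Char)
    (hPre : ∀ i < cs.length, cs[i]? = some '(' →
      1 ≤ i ∧ ∃ j < cs.length, i < j ∧ cs[j]? = some ')') :
    ∀ fuel i cA cB xA xB, cs.length - i < fuel → 1 ≤ i → i ≤ cs.length →
      cA.length = cB.length →
      (cA ≠ cB ∨ (1 ≤ xA.length ∧ xA.length < xB.length)) →
      loopA cs fuel i (cA ++ [xA]) ≠ loopB (cs.drop i) (cB ++ [xB]) false := by
  intro fuel
  induction fuel with
  | zero => intro i cA cB xA xB hf; omega
  | succ fuel ih =>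
    intro i cA cB xA xB hf h1 hlen hclen hdiff
    by_cases hi : i < cs.length
    · by_cases hpar : cs[i] = '('
      · obtain ⟨j, hij', hjlen, hjq, hnoc, hseglen, hstepA, hstepB⟩ :=
          paren_step cs hPre fuel i hi h1 hpar
        rw [hstepA, hstepB, List.dropLast_concat]
        refine ih (j + 1) cA cB _ _ (by omega) (by omega) (by omega) hclen ?_
        rcases hdiff with h | ⟨hx1, hx2⟩
        · exact Or.inl h
        · refine Or.inr ⟨by simp, ?_⟩
          simp [String.length_append, hseglen]
          omega
      · rw [loopA, dif_pos hi, if_neg hpar, List.drop_eq_getElem_cons hi, loopB, if_neg hpar]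
        have hne : cA ++ [xA] ≠ cB ++ [xB] := by
          intro h
          obtain ⟨h1', h2'⟩ := List.append_inj h hclen
          rcases hdiff with h | ⟨_, hx2⟩
          · exact h h1'
          · rw [List.cons.injEq] at h2'
            rw [h2'.1] at hx2
            omega
        exact ih (i + 1) (cA ++ [xA]) (cB ++ [xB]) _ _ (by omega) (by omega) (by omega)
          (by simp [hclen]) (Or.inl hne)
    · have : i = cs.length := by omega
      subst this
      rw [loopA, dif_neg hi, List.drop_length, loopB]
      intro h
      obtain ⟨h1', h2'⟩ := List.append_inj h hclen
      rcases hdiff with h | ⟨_, hx2⟩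
      · exact h h1'
      · rw [List.cons.injEq] at h2'
        rw [h2'.1] at hx2
        omega

-- the simulation: equal accumulators stay equal until (exactly) a group-closing ')' is
-- immediately followed by '('; from that point on the results differ
theorem main_lemma (cs : List Char)
    (hPre : ∀ i < cs.length, cs[i]? = some '(' →
      1 ≤ i ∧ ∃ j < cs.length, i < j ∧ cs[j]? = some ')') :
    ∀ fuel i front x, cs.length - i < fuel → 1 ≤ i → i ≤ cs.length →
      ¬ GCclose cs i →
      ((x = String.singleton (cs.getD (i - 1) ' ') ∧ ¬ (cs[i - 1]? = some ')' ∧ GCclose cs (i - 1)))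
        ∨ (cs[i - 1]? = some ')' ∧ GCclose cs (i - 1) ∧ 3 ≤ x.length)) →
      ((∃ p, i ≤ p + 1 ∧ cs[p]? = some ')' ∧ GCclose cs p ∧ cs[p + 1]? = some '(') →
        loopA cs fuel i (front ++ [x]) ≠ loopB (cs.drop i) (front ++ [x]) false)
      ∧ ((¬ ∃ p, i ≤ p + 1 ∧ cs[p]? = some ')' ∧ GCclose cs p ∧ cs[p + 1]? = some '(') →
        loopA cs fuel i (front ++ [x]) = loopB (cs.drop i) (front ++ [x]) false) := by
  intro fuel
  induction fuel with
  | zero => intro i front x hf; omega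
  | succ fuel ih =>
    intro i front x hf h1 hlen hopen hinv
    by_cases hi : i < cs.length
    · by_cases hpar : cs[i] = '('
      · obtain ⟨j, hij', hjlen, hjq, hnoc, hseglen, hstepA, hstepB⟩ :=
          paren_step cs hPre fuel i hi h1 hpar
        have hiq : cs[i]? = some '(' := by rw [List.getElem?_eq_getElem hi, hpar]
        have hgcj : GCclose cs j := ⟨i, by omega, hiq, fun r hr hir => hnoc r (by omega) (by omega)⟩
        have hopen' : ¬ GCclose cs (j + 1) := by
          rintro ⟨q, hq, hqpar, hqno⟩
          rcases Nat.lt_or_ge q j with hqj | hqj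
          · exact hqno j (by omega) hqj hjq
          · have : q = j := by omega
            rw [this, hjq] at hqpar
            exact absurd (by injection hqpar) (by decide)
        rcases hinv with ⟨hx, hnc⟩ | ⟨hc1, hc2, hx3⟩
        · -- accumulators still equal: take the group step and recurse
          rw [hstepA, hstepB, List.dropLast_concat]
          have helem : String.ofList (cs.getD (i - 1) ' ' :: '(' :: ((cs.drop (i + 1)).take (j - (i + 1)) ++ [')']))
              = x ++ String.ofList ('(' :: ((cs.drop (i + 1)).take (j - (i + 1)) ++ [')'])) := by
            apply String.toList_injective
            simp [hx]
          rw [helem]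
          have hinv' : (x ++ String.ofList ('(' :: ((cs.drop (i + 1)).take (j - (i + 1)) ++ [')']))) = String.singleton (cs.getD ((j + 1) - 1) ' ') ∧ ¬ (cs[(j + 1) - 1]? = some ')' ∧ GCclose cs ((j + 1) - 1)) ∨
              (cs[(j + 1) - 1]? = some ')' ∧ GCclose cs ((j + 1) - 1) ∧ 3 ≤ (x ++ String.ofList ('(' :: ((cs.drop (i + 1)).take (j - (i + 1)) ++ [')']))).length) := by
            refine Or.inr ⟨by simpa using hjq, by simpa using hgcj, ?_⟩
            rw [String.length_append]
            have hxl : x.length = 1 := by rw [hx]; simp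
            have hol : (String.ofList ('(' :: ((cs.drop (i + 1)).take (j - (i + 1)) ++ [')']))).length
                = (j - (i + 1)) + 2 := by simp [hseglen]
            omega
          obtain ⟨hne, heq⟩ := ih (j + 1) front _ (by omega) (by omega) (by omega) hopen' hinv'
          constructor
          · intro ⟨p, hp1, hp2, hp3, hp4⟩
            refine hne ⟨p, ?_, hp2, hp3, hp4⟩
            rcases Nat.lt_or_ge (p + 1) (j + 1) with hpj | hpj
            · exfalso
              rcases Nat.eq_or_lt_of_le hp1 with he | hlt
              · exact hnc ⟨by rw [show i - 1 = p by omega]; exact hp2,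
                  by rw [show i - 1 = p by omega]; exact hp3⟩
              · rcases Nat.eq_or_lt_of_le (show i + 1 ≤ p + 1 by omega) with he2 | hlt2
                · have : p = i := by omega
                  rw [this, hiq] at hp2
                  exact absurd (by injection hp2) (by decide)
                · exact hnoc p (by omega) (by omega) hp2
            · exact hpj
          · intro hno'
            refine heq (fun ⟨p, hp1, hp2, hp3, hp4⟩ => hno' ⟨p, by omega, hp2, hp3, hp4⟩)
        · -- divergence: A rebuilds the element from the ')' , B appends to the whole group
          rw [hstepA, hstepB, List.dropLast_concat]
          have hlen1 : (String.ofList (cs.getD (i - 1) ' ' :: '(' :: ((cs.drop (i + 1)).take (j - (i + 1)) ++ [')']))).length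
              = j - i + 2 := by
            simp [hseglen]; omega
          have hlen2 : (x ++ String.ofList ('(' :: ((cs.drop (i + 1)).take (j - (i + 1)) ++ [')']))).length
              = x.length + (j - i + 1) := by
            simp [String.length_append, hseglen]; omega
          have hdiff := diff_lemma cs hPre fuel (j + 1) front front
            (String.ofList (cs.getD (i - 1) ' ' :: '(' :: ((cs.drop (i + 1)).take (j - (i + 1)) ++ [')'])))
            (x ++ String.ofList ('(' :: ((cs.drop (i + 1)).take (j - (i + 1)) ++ [')'])))
            (by omega) (by omega) (by omega) rfl
            (Or.inr ⟨by rw [hlen1]; omega, by rw [hlen1, hlen2]; omega⟩)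
          constructor
          · intro _; exact hdiff
          · intro hno'
            exfalso
            exact hno' ⟨i - 1, by omega, hc1, hc2, by rw [Nat.sub_add_cancel h1]; exact hiq⟩
      · -- plain character
        have hnparq : cs[i]? ≠ some '(' := by
          rw [List.getElem?_eq_getElem hi]
          intro h; exact hpar (by injection h)
        have hopen' : ¬ GCclose cs (i + 1) := by
          rintro ⟨q, hq, hqpar, hqno⟩
          rcases Nat.lt_or_ge q i with hqi | hqi
          · exact hopen ⟨q, hqi, hqpar, fun r hr hqr => hqno r (by omega) hqr⟩
          · have : q = i := by omega
            rw [this] at hqpar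
            exact hnparq hqpar
        have hinv' : String.singleton cs[i] = String.singleton (cs.getD ((i + 1) - 1) ' ') ∧ ¬ (cs[(i + 1) - 1]? = some ')' ∧ GCclose cs ((i + 1) - 1)) ∨
            (cs[(i + 1) - 1]? = some ')' ∧ GCclose cs ((i + 1) - 1) ∧ 3 ≤ (String.singleton cs[i]).length) := by
          refine Or.inl ⟨by simp [List.getD_eq_getElem?_getD, List.getElem?_eq_getElem hi], ?_⟩
          rintro ⟨-, hgc⟩
          exact hopen (by simpa using hgc)
        obtain ⟨hne, heq⟩ := ih (i + 1) (front ++ [x]) (String.singleton cs[i])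
          (by omega) (by omega) (by omega) hopen' hinv'
        rw [loopA, dif_pos hi, if_neg hpar, List.drop_eq_getElem_cons hi, loopB, if_neg hpar]
        constructor
        · intro ⟨p, hp1, hp2, hp3, hp4⟩
          have hp1' : i + 1 ≤ p + 1 := by
            rcases Nat.eq_or_lt_of_le hp1 with he | hlt
            · exfalso
              have : p + 1 = i := by omega
              rw [this] at hp4
              exact hnparq hp4
            · omega
          have := hne ⟨p, hp1', hp2, hp3, hp4⟩
          simpa using this
        · intro hno'
          have := heq (fun ⟨p, hp1, hp2, hp3, hp4⟩ => hno' ⟨p, by omega, hp2, hp3, hp4⟩)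
          simpa using this
    · have : i = cs.length := by omega
      subst this
      constructor
      · intro ⟨p, hp1, hp2, hp3, hp4⟩
        exfalso
        have hplen : p < cs.length := by
          by_contra hge
          rw [List.getElem?_eq_none (by omega)] at hp2
          exact absurd hp2 (by simp)
        have : p + 1 = cs.length := by omega
        rw [this, List.getElem?_eq_none (le_refl _)] at hp4
        exact absurd hp4 (by simp)
      · intro _
        rw [loopA, dif_neg hi, List.drop_length, loopB]

-- unfold lemmas for dGo's overlapping match
theorem dGo_hit (t : List Char) (h : t.head? = some '(') : dGo true (')' :: t) = true := by
  cases t with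
  | nil => simp at h
  | cons d t' =>
    have : d = '(' := by simpa using h
    subst this
    rfl

theorem dGo_step (b : Bool) (c : Char) (t : List Char)
    (h : ¬ (b = true ∧ c = ')' ∧ t.head? = some '(')) :
    dGo b (c :: t) = dGo (c == '(' || b && c != ')') t := by
  rw [dGo.eq_def]
  split
  · next heq =>
    exfalso
    cases heq
    exact h ⟨rfl, rfl, rfl⟩
  · next heq =>
    cases heq
    rfl
  · next hno _ => exact absurd rfl (hno c t)

-- the index form of the change region implies D_ (two inductions over the scan)
theorem dGo_of_noClose (cs : List Char) : ∀ i, i < cs.length → cs[i]? = some ')' →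
    cs[i + 1]? = some '(' → (∀ r < i, cs[r]? ≠ some ')') → dGo true cs = true := by
  induction cs with
  | nil => intro i hi; simp at hi
  | cons c rest ih =>
    intro i hi h1 h2 h4
    match i, h1 with
    | 0, h1 =>
      have hc : c = ')' := by simpa using h1
      have hh : rest.head? = some '(' := by
        cases rest with
        | nil => simp at h2
        | cons d t => simpa using h2
      subst hc
      exact dGo_hit rest hh
    | i + 1, h1 =>
      have hc : c ≠ ')' := by
        have := h4 0 (by omega)
        simpa using this
      have hrec : dGo true rest = true := ih i (by simpa using hi) (by simpa using h1)
        (by simpa using h2) (fun r hr => by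
          have := h4 (r + 1) (by omega)
          simpa using this)
      rw [dGo_step true c rest (by simp [hc])]
      have harg : (c == '(' || true && c != ')') = true := by simp [bne, hc]
      rw [harg]
      exact hrec

theorem D_of_index (s : String) (i q : Nat) (hi : i < s.toList.length)
    (h1 : s.toList[i]? = some ')') (h2 : s.toList[i + 1]? = some '(')
    (hq : q < i) (h3 : s.toList[q]? = some '(')
    (h4 : ∀ r < i, q < r → s.toList[r]? ≠ some ')') :
    D_transfer_str_to_list_seq s := by
  unfold D_transfer_str_to_list_seq
  suffices h : ∀ (cs : List Char) (i q : Nat), i < cs.length → cs[i]? = some ')' →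
      cs[i + 1]? = some '(' → q < i → cs[q]? = some '(' →
      (∀ r < i, q < r → cs[r]? ≠ some ')') → ∀ b, dGo b cs = true by
    exact h s.toList i q hi h1 h2 hq h3 h4 false
  clear hi h1 h2 hq h3 h4 i q
  intro cs
  induction cs with
  | nil => intro i q hi; simp at hi
  | cons c rest ih =>
    intro i q hi h1 h2 hq h3 h4 b
    match q, h3 with
    | 0, h3 =>
      have hc : c = '(' := by simpa using h3
      subst hc
      match i, hq with
      | i + 1, _ =>
        have hno : dGo true rest = true :=
          dGo_of_noClose rest i (by simpa using hi) (by simpa using h1)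
            (by simpa using h2) (fun r hr => by
              have := h4 (r + 1) (by omega) (by omega)
              simpa using this)
        rw [dGo_step b '(' rest (by simp)]
        have harg : ('(' == '(' || b && '(' != ')') = true := by simp
        rw [harg]
        exact hno
    | q + 1, h3 =>
      match i, hq with
      | i + 1, hq =>
        have hrec : ∀ b, dGo b rest = true := fun b =>
          ih i q (by simpa using hi) (by simpa using h1) (by simpa using h2)
            (by omega) (by simpa using h3) (fun r hr hqr => by
              have := h4 (r + 1) (by omega) (by omega)
              simpa using this) b
        by_cases hhit : b = true ∧ c = ')' ∧ rest.head? = some '('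
        · obtain ⟨rfl, rfl, hh⟩ := hhit
          exact dGo_hit rest hh
        · rw [dGo_step b c rest hhit]
          exact hrec _

-- if some '(' has no ')' after it, the last paren of the string is '('
theorem find?_reverse_lastParen (cs : List Char) (i : Nat) (hi : i < cs.length)
    (hp : cs[i]? = some '(')
    (hno : ∀ j < cs.length, i < j → cs[j]? ≠ some ')') :
    cs.reverse.find? (fun c => c == '(' || c == ')') = some '(' := by
  induction cs using List.reverseRecOn with
  | nil => simp at hi
  | append_singleton l a ih =>
    rw [List.reverse_append, List.reverse_singleton, List.singleton_append, List.find?]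
    by_cases hpa : (a == '(' || a == ')') = true
    · rw [hpa]
      rcases Bool.or_eq_true _ _ |>.mp hpa with h | h
      · simp [beq_iff_eq] at h
        rw [h]
      · exfalso
        have ha : a = ')' := by simpa using h
        have hil : i < l.length := by
          rcases Nat.lt_or_ge i l.length with h' | h'
          · exact h'
          · exfalso
            have : i = l.length := by
              simp [List.length_append] at hi; omega
            rw [this, List.getElem?_append_right (le_refl _)] at hp
            simp [ha] at hp
        exact hno l.length (by simp) hil
          (by rw [List.getElem?_append_right (le_refl _)]; simp [ha])
    · rw [Bool.not_eq_true] at hpa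
      rw [hpa]
      have hil : i < l.length := by
        rcases Nat.lt_or_ge i l.length with h' | h'
        · exact h'
        · exfalso
          have : i = l.length := by
            simp [List.length_append] at hi; omega
          rw [this, List.getElem?_append_right (le_refl _)] at hp
          simp at hp
          rw [hp] at hpa
          simp at hpa
      exact ih hil (by rwa [List.getElem?_append_left hil] at hp)
        (fun j hj hij => by
          have := hno j (by simp [List.length_append]; omega) hij
          rwa [List.getElem?_append_left hj] at this)

-- the stated Pre_ gives the per-'(' index facts the simulation uses
theorem pre_index (s : String) (hPre : Pre_transfer_str_to_list_seq s) :
    ∀ i < s.toList.length, s.toList[i]? = some '(' →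
      1 ≤ i ∧ ∃ j < s.toList.length, i < j ∧ s.toList[j]? = some ')' := by
  intro i hi hp
  constructor
  · rcases Nat.eq_zero_or_pos i with rfl | h
    · exfalso
      exact hPre.1 (by rwa [List.head?_eq_getElem?])
    · exact h
  · by_contra hno
    push Not at hno
    exact hPre.2 (find?_reverse_lastParen s.toList i hi hp
      (fun j hj hij => hno j hj hij))

-- converse: a true dGo scan yields the index structure of the change region
theorem dGo_to_index (l : List Char) : ∀ b, dGo b l = true →
    ∃ p, l[p]? = some ')' ∧ l[p + 1]? = some '(' ∧
      ((∃ q < p, l[q]? = some '(' ∧ ∀ r < p, q < r → l[r]? ≠ some ')') ∨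
       (b = true ∧ ∀ r < p, l[r]? ≠ some ')')) := by
  induction l with
  | nil => intro b h; simp [dGo] at h
  | cons c t ih =>
    intro b h
    by_cases hhit : b = true ∧ c = ')' ∧ t.head? = some '('
    · obtain ⟨hb, rfl, hh⟩ := hhit
      refine ⟨0, by simp, ?_, Or.inr ⟨hb, fun r hr => by omega⟩⟩
      rw [List.getElem?_cons_succ, ← List.head?_eq_getElem?]
      exact hh
    · rw [dGo_step _ _ _ hhit] at h
      obtain ⟨p, h1, h2, h3⟩ := ih _ h
      refine ⟨p + 1, by simpa using h1, by simpa using h2, ?_⟩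
      rcases h3 with ⟨q, hq, hqp, hqno⟩ | ⟨hb', hno⟩
      · refine Or.inl ⟨q + 1, by omega, by simpa using hqp, ?_⟩
        intro r hr hqr
        match r, hr, hqr with
        | r + 1, hr, hqr => simpa using hqno r (by omega) (by omega)
      · rcases Bool.or_eq_true _ _ |>.mp hb' with hc | hbc
        · have hcp : c = '(' := by simpa using hc
          refine Or.inl ⟨0, by omega, by simp [hcp], ?_⟩
          intro r hr h0r
          match r, hr with
          | r + 1, hr => simpa using hno r (by omega)
        · have hb : b = true := (Bool.and_eq_true _ _ |>.mp hbc).1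
          have hc : c ≠ ')' := by
            have := (Bool.and_eq_true _ _ |>.mp hbc).2
            simpa using this
          refine Or.inr ⟨hb, ?_⟩
          intro r hr
          match r with
          | 0 => simpa using hc
          | r + 1 => simpa using hno r (by omega)

theorem transfer_str_to_list_seq_spec : Claim_unchanged_transfer_str_to_list_seq := by
  intro s hDom hPre0
  unfold Spec_transfer_str_to_list_seq
  intro hD
  have hPre := pre_index s hPre0
  simp only [transfer_str_to_list_seq, transfer_str_to_list_seq_alt]
  by_cases hmem : '(' ∈ s.toList
  · rw [if_neg (by simpa using hmem)]
    have h0 : 0 < s.toList.length := List.length_pos_iff.mpr (by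
      intro h; rw [h] at hmem; simp at hmem)
    have h0par : s.toList[0] ≠ '(' := by
      intro h
      have := hPre 0 h0 (by rw [List.getElem?_eq_getElem h0, h])
      omega
    have hcons : s.toList = s.toList[0] :: s.toList.drop 1 := by
      conv_lhs => rw [← List.drop_zero (l := s.toList), List.drop_eq_getElem_cons h0]
    have hopen1 : ¬ GCclose s.toList 1 := by
      rintro ⟨q, hq, hqpar, -⟩
      have : q = 0 := by omega
      rw [this, List.getElem?_eq_getElem h0] at hqpar
      exact h0par (by injection hqpar)
    have hinv1 : String.singleton s.toList[0] = String.singleton (s.toList.getD (1 - 1) ' ') ∧ ¬ (s.toList[1 - 1]? = some ')' ∧ GCclose s.toList (1 - 1)) ∨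
        (s.toList[1 - 1]? = some ')' ∧ GCclose s.toList (1 - 1) ∧ 3 ≤ (String.singleton s.toList[0]).length) := by
      refine Or.inl ⟨by simp [List.getD_eq_getElem?_getD, List.getElem?_eq_getElem h0], ?_⟩
      rintro ⟨-, q, hq, -⟩
      omega
    obtain ⟨-, heq⟩ := main_lemma s.toList hPre s.toList.length 1 [] (String.singleton s.toList[0])
      (by omega) (by omega) (by omega) hopen1 hinv1
    have hnoev : ¬ ∃ p, 1 ≤ p + 1 ∧ s.toList[p]? = some ')' ∧ GCclose s.toList p ∧
        s.toList[p + 1]? = some '(' := by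
      rintro ⟨p, -, hp2, hp3, hp4⟩
      apply hD
      obtain ⟨hplen, -⟩ := List.getElem?_eq_some_iff.mp hp2
      obtain ⟨q, hq, hqpar, hqno⟩ := hp3
      exact D_of_index s p q hplen hp2 hp4 hq hqpar hqno
    have := heq hnoev
    rw [loopA, dif_pos h0, if_neg h0par]
    conv_rhs => rw [hcons, loopB, if_neg h0par]
    simpa using this
  · rw [if_pos hmem, loopB_noParen _ _ hmem]
    simp

theorem transfer_str_to_list_seq_changed : Claim_changed_transfer_str_to_list_seq := by
  unfold Claim_changed_transfer_str_to_list_seq; decide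

theorem transfer_str_to_list_seq_tight : Claim_exact_transfer_str_to_list_seq := by
  intro s hDom hPre0 hD
  have hPre := pre_index s hPre0
  unfold D_transfer_str_to_list_seq at hD
  obtain ⟨p, hp1, hp2, hor⟩ := dGo_to_index s.toList false hD
  have hp3 : GCclose s.toList p := by
    rcases hor with h | ⟨hb, -⟩
    · exact h
    · exact absurd hb (by simp)
  have hmem : '(' ∈ s.toList := by
    obtain ⟨h, hv⟩ := List.getElem?_eq_some_iff.mp hp2
    exact hv ▸ List.getElem_mem h
  simp only [transfer_str_to_list_seq, transfer_str_to_list_seq_alt]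
  rw [if_neg (by simpa using hmem)]
  have h0 : 0 < s.toList.length := List.length_pos_iff.mpr (by
    intro h; rw [h] at hmem; simp at hmem)
  have h0par : s.toList[0] ≠ '(' := by
    intro h
    have := hPre 0 h0 (by rw [List.getElem?_eq_getElem h0, h])
    omega
  have hcons : s.toList = s.toList[0] :: s.toList.drop 1 := by
    conv_lhs => rw [← List.drop_zero (l := s.toList), List.drop_eq_getElem_cons h0]
  have hopen1 : ¬ GCclose s.toList 1 := by
    rintro ⟨q, hq, hqpar, -⟩
    have : q = 0 := by omega
    rw [this, List.getElem?_eq_getElem h0] at hqpar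
    exact h0par (by injection hqpar)
  have hinv1 : String.singleton s.toList[0] = String.singleton (s.toList.getD (1 - 1) ' ') ∧ ¬ (s.toList[1 - 1]? = some ')' ∧ GCclose s.toList (1 - 1)) ∨
      (s.toList[1 - 1]? = some ')' ∧ GCclose s.toList (1 - 1) ∧ 3 ≤ (String.singleton s.toList[0]).length) := by
    refine Or.inl ⟨by simp [List.getD_eq_getElem?_getD, List.getElem?_eq_getElem h0], ?_⟩
    rintro ⟨-, q, hq, -⟩
    omega
  obtain ⟨hne, -⟩ := main_lemma s.toList hPre s.toList.length 1 [] (String.singleton s.toList[0])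
    (by omega) (by omega) (by omega) hopen1 hinv1
  have := hne ⟨p, by omega, hp1, hp3, hp2⟩
  rw [loopA, dif_pos h0, if_neg h0par]
  conv_rhs => rw [hcons, loopB, if_neg h0par]
  simpa using this
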